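-- pv_equiv track=rewrite | github.com/ramuuns/aoc | 2025/day10.py | find_solo
-- ===== SOURCE A (Python) =====
-- def find_solo(buttons):
--     indexes_to_buttons = {}
--     for i, button in enumerate(buttons):
--         for index in button:
--             if index in indexes_to_buttons:
--                 indexes_to_buttons[index].append(button)
--             else:
--                 indexes_to_buttons[index] = [(i, button)]
--     for bttns in indexes_to_buttons.values():
--         if len(bttns) == 1:
--             i, bttn = bttns[0]
--             return (bttn, buttons[:i] + buttons[i+1:])
--     return None
-- ===== SOURCE B (Python) =====
-- def find_solo(buttons):
--     counts = {}
--     for button in buttons: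
--         for index in button:
--             counts[index] = counts.get(index, 0) + 1
--     for i, button in enumerate(buttons):
--         for index in button:
--             if counts[index] == 1:
--                 return (button, buttons[:i] + buttons[i + 1:])
--     return None
-- ===== Notes on version B (the rewrite author's own statement) =====
-- stated objective: simpler
-- what changed: Replaced the index->list-of-buttons dict (with its mixed (i,button)/button entries) and the scan over its values by a plain occurrence-count table plus a second nested scan over the buttons themselves, returning at the first index whose total count is 1.
import Mathlib
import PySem

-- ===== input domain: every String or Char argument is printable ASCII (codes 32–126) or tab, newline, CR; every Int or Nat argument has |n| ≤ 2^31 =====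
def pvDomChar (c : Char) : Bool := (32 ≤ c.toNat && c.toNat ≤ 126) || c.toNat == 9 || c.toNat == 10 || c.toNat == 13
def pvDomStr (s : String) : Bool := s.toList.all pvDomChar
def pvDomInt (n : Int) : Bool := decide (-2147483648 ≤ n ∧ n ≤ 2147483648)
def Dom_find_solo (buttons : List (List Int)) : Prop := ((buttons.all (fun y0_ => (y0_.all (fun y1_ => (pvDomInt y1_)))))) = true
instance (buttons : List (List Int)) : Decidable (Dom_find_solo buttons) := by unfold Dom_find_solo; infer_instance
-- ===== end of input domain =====

-- B replaces A's index -> list-of-buttons dict by an occurrence-count table plus a fresh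
-- nested scan over the buttons, returning at the first index whose total count is 1 (simpler).

-- ===== PORT A =====
-- dict values in A mix (i, button) pairs (first occurrence) and bare buttons (later
-- occurrences); ported as a sum type.
def pvStepA (m : PySem.Dict Int (List ((Int × List Int) ⊕ List Int))) (i : Int)
    (button : List Int) (index : Int) : PySem.Dict Int (List ((Int × List Int) ⊕ List Int)) :=
  if m.contains index then
    m.modify index [] (fun l => l ++ [Sum.inr button])      -- indexes_to_buttons[index].append(button)
  else
    m.insert index [Sum.inl (i, button)]

def pvBuildA (buttons : List (List Int)) : PySem.Dict Int (List ((Int × List Int) ⊕ List Int)) :=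
  (PySem.List.enumerate buttons).foldl
    (fun m p => p.2.foldl (fun m index => pvStepA m p.1 p.2 index) m) PySem.Dict.empty

def pvScanA (buttons : List (List Int)) :
    List (List ((Int × List Int) ⊕ List Int)) → Option (List Int × List (List Int))
  | [] => none
  | v :: rest =>
    if v.length = 1 then
      match v with
      | [Sum.inl (i, b)] =>
          some (b, PySem.List.slice buttons none (some i) ++ PySem.List.slice buttons (some (i + 1)) none)
      | _ => pvScanA buttons rest  -- unreachable: the first element stored for a key is always a pair
    else pvScanA buttons rest

def find_solo (buttons : List (List Int)) : Option (List Int × List (List Int)) :=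
  pvScanA buttons (PySem.Dict.values (pvBuildA buttons))

-- ===== PORT B =====
def pvCountsB (buttons : List (List Int)) : PySem.Dict Int Int :=
  buttons.foldl (fun c b => b.foldl (fun c x => c.insert x (c.getD x 0 + 1)) c) PySem.Dict.empty

-- counts[index] can never miss (index was counted), so getD is exact here
def pvScanB (buttons : List (List Int)) (counts : PySem.Dict Int Int) :
    List (Int × List Int) → Option (List Int × List (List Int))
  | [] => none
  | p :: rest =>
    if p.2.any (fun x => counts.getD x 0 == 1) then
      some (p.2, PySem.List.slice buttons none (some p.1) ++ PySem.List.slice buttons (some (p.1 + 1)) none)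
    else pvScanB buttons counts rest

def find_solo_alt (buttons : List (List Int)) : Option (List Int × List (List Int)) :=
  pvScanB buttons (pvCountsB buttons) (PySem.List.enumerate buttons)

-- ===== PRECONDITION & SPEC =====
def Spec_find_solo (buttons : List (List Int)) (out : Option (List Int × List (List Int))) : Prop := out = find_solo_alt buttons
instance (buttons : List (List Int)) (out : Option (List Int × List (List Int))) : Decidable (Spec_find_solo buttons out) := by unfold Spec_find_solo; infer_instance

-- ===== CLAIM (what is proved, stated in full; the proofs are below) =====
def Claim_equal_find_solo : Prop := ∀ (buttons : List (List Int)), Dom_find_solo buttons → Spec_find_solo buttons (find_solo buttons)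

-- ===== LEMMAS AND PROOFS =====

-- the stream of (enumerated button, index) events, in A's and B's common scan order
def pvTris (buttons : List (List Int)) : List ((Int × List Int) × Int) :=
  (PySem.List.enumerate buttons).flatMap (fun p => p.2.map (fun x => (p, x)))

-- common specification: first event whose index occurs exactly once overall
def pvFirst (buttons : List (List Int)) (c : Int → Nat) :
    List ((Int × List Int) × Int) → Option (List Int × List (List Int))
  | [] => none
  | u :: ts =>
    if c u.2 = 1 then
      some (u.1.2, PySem.List.slice buttons none (some u.1.1) ++ PySem.List.slice buttons (some (u.1.1 + 1)) none)
    else pvFirst buttons c ts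

-- canonical shape of A's dict items
def pvGroup : List ((Int × List Int) × Int) → List (Int × List ((Int × List Int) ⊕ List Int))
  | [] => []
  | t :: ts =>
    (t.2, Sum.inl t.1 :: (ts.filter (fun u => u.2 == t.2)).map (fun u => Sum.inr u.1.2))
      :: pvGroup (ts.filter (fun u => !(u.2 == t.2)))
termination_by ts => ts.length
decreasing_by
  simp only [List.length_cons, List.length_unattach]
  exact Nat.lt_succ_of_le (le_trans (List.length_filter_le _ _) (by simp))

-- A's fold over buttons-then-indexes equals a single fold over the event stream
theorem pvBuildA_eq_foldl (buttons : List (List Int)) :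
    pvBuildA buttons = (pvTris buttons).foldl (fun m t => pvStepA m t.1.1 t.1.2 t.2) PySem.Dict.empty := by
  unfold pvBuildA pvTris
  rw [List.foldl_flatMap]
  simp [List.foldl_map]

theorem pvItems_foldl_step (ts : List ((Int × List Int) × Int)) :
    ∀ (m : PySem.Dict Int (List ((Int × List Int) ⊕ List Int))), m.keys.Nodup →
    (ts.foldl (fun m t => pvStepA m t.1.1 t.1.2 t.2) m).items =
      m.items.map (fun kv => (kv.1, kv.2 ++ (ts.filter (fun t => t.2 == kv.1)).map (fun t => Sum.inr t.1.2)))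
      ++ pvGroup (ts.filter (fun t => !(m.contains t.2))) := by
  induction ts with
  | nil => intro m hnd; simp [pvGroup]
  | cons t ts ih =>
    intro m hnd
    rw [List.foldl_cons]
    by_cases hc : m.contains t.2 = true
    · have hstep : pvStepA m t.1.1 t.1.2 t.2 = m.insert t.2 (m.getD t.2 [] ++ [Sum.inr t.1.2]) := by
        simp [pvStepA, hc, PySem.Dict.modify]
      have hkeys : (m.insert t.2 (m.getD t.2 [] ++ [Sum.inr t.1.2])).keys = m.keys :=
        PySem.Dict.keys_insert_of_contains _ _ hc
      rw [hstep, ih _ (by rw [hkeys]; exact hnd)]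
      congr 1
      · rw [PySem.Dict.items_insert_of_contains _ _ hc, List.map_map]
        apply List.map_congr_left
        intro kv hkv
        rcases kv with ⟨k, v⟩
        by_cases hk : k = t.2
        · subst hk
          have hvd : m.getD t.2 [] = v := PySem.Dict.getD_of_mem_items m hkv hnd []
          simp [Function.comp, List.filter_cons, hvd]
        · have hne : (k == t.2) = false := by simp [hk]
          have hne2 : (t.2 == k) = false := by simp [Ne.symm hk]
          simp [Function.comp, List.filter_cons, hne, hne2]
      · have hcont : ∀ u ∈ ts, (!(m.insert t.2 (m.getD t.2 [] ++ [Sum.inr t.1.2])).contains u.2)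
            = (!(m.contains u.2)) := by
          intro u _
          rw [PySem.Dict.contains_insert]
          by_cases h : u.2 = t.2
          · simp [h, hc]
          · simp [h]
        have hgc : (t :: ts).filter (fun u => !(m.contains u.2)) = ts.filter (fun u => !(m.contains u.2)) := by
          simp [List.filter_cons, hc]
        rw [List.filter_congr hcont, hgc]
    · have hnc : m.contains t.2 = false := by simpa using hc
      have hstep : pvStepA m t.1.1 t.1.2 t.2 = m.insert t.2 [Sum.inl t.1] := by
        simp [pvStepA, hnc]
      have hkn : (m.insert t.2 [Sum.inl t.1]).keys.Nodup := by
        rw [PySem.Dict.keys_insert_of_not_contains _ _ hnc]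
        refine List.Nodup.append hnd (List.nodup_singleton _) ?_
        intro a ha hb
        simp at hb
        subst hb
        exact absurd ((PySem.Dict.contains_iff_mem_keys m t.2).2 ha) (by simp [hnc])
      rw [hstep, ih _ hkn, PySem.Dict.items_insert_of_not_contains _ _ hnc, List.map_append]
      have hcont : ∀ u ∈ ts, (!(m.insert t.2 [Sum.inl t.1]).contains u.2)
          = (!(u.2 == t.2) && !(m.contains u.2)) := by
        intro u _
        rw [PySem.Dict.contains_insert]
        by_cases h : u.2 = t.2 <;> simp [h]
      rw [List.filter_congr hcont]
      have hgR : (t :: ts).filter (fun u => !(m.contains u.2))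
          = t :: ts.filter (fun u => !(m.contains u.2)) := by
        simp [List.filter_cons, hnc]
      rw [hgR]
      rw [show pvGroup (t :: ts.filter (fun u => !(m.contains u.2)))
          = (t.2, Sum.inl t.1 :: ((ts.filter (fun u => !(m.contains u.2))).filter
                (fun u => u.2 == t.2)).map (fun u => Sum.inr u.1.2))
            :: pvGroup ((ts.filter (fun u => !(m.contains u.2))).filter (fun u => !(u.2 == t.2)))
          from by rw [pvGroup]]
      have hgfix : (ts.filter (fun u => !(m.contains u.2))).filter (fun u => u.2 == t.2)
          = ts.filter (fun u => u.2 == t.2) := by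
        rw [List.filter_filter]
        apply List.filter_congr
        intro u _
        by_cases h : u.2 = t.2 <;> simp [h, hnc]
      have hgfix2 : (ts.filter (fun u => !(m.contains u.2))).filter (fun u => !(u.2 == t.2))
          = ts.filter (fun u => !(u.2 == t.2) && !(m.contains u.2)) := by
        rw [List.filter_filter]
      have hitems : m.items.map (fun kv => (kv.1, kv.2 ++ ((t :: ts).filter (fun u => u.2 == kv.1)).map (fun u => Sum.inr u.1.2)))
          = m.items.map (fun kv => (kv.1, kv.2 ++ (ts.filter (fun u => u.2 == kv.1)).map (fun u => Sum.inr u.1.2))) := by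
        apply List.map_congr_left
        intro kv hkv
        have hne : (t.2 == kv.1) = false := by
          by_contra h
          have h1 : t.2 = kv.1 := by simpa using h
          have hmem : kv.1 ∈ m.keys := PySem.Dict.mem_keys_of_mem_items m hkv
          rw [← h1] at hmem
          exact absurd ((PySem.Dict.contains_iff_mem_keys m t.2).2 hmem) (by simp [hnc])
        simp [List.filter_cons, hne]
      rw [hgfix, hgfix2, hitems]
      simp

theorem pvBuildA_items (buttons : List (List Int)) :
    (pvBuildA buttons).items = pvGroup (pvTris buttons) := by
  rw [pvBuildA_eq_foldl, pvItems_foldl_step (pvTris buttons) PySem.Dict.empty (by simp)]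
  simp
  rfl

theorem pvFirst_filter_ne (buttons : List (List Int)) (F : List Int) (y : Int)
    (hy : F.count y ≠ 1) (ts : List ((Int × List Int) × Int)) :
    pvFirst buttons (F.count) ts = pvFirst buttons (F.count) (ts.filter (fun w => !(w.2 == y))) := by
  induction ts with
  | nil => rfl
  | cons u ts ih =>
    by_cases h : u.2 = y
    · have h1 : F.count u.2 ≠ 1 := by rw [h]; exact hy
      have hfc : (u :: ts).filter (fun w => !(w.2 == y)) = ts.filter (fun w => !(w.2 == y)) := by
        simp [List.filter_cons, h]
      rw [hfc, pvFirst, if_neg h1, ih]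
    · have hfc : (u :: ts).filter (fun w => !(w.2 == y)) = u :: ts.filter (fun w => !(w.2 == y)) := by
        simp [List.filter_cons, h]
      rw [hfc, pvFirst, pvFirst]
      by_cases h1 : F.count u.2 = 1
      · simp [h1]
      · simp [h1, ih]

theorem pvScanA_group_aux (buttons : List (List Int)) (F : List Int) :
    ∀ (n : Nat) (ts : List ((Int × List Int) × Int)), ts.length ≤ n →
    (∀ t ∈ ts, (ts.map (·.2)).count t.2 = F.count t.2) →
    pvScanA buttons ((pvGroup ts).map (·.2)) = pvFirst buttons (F.count) ts := by
  intro n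
  induction n with
  | zero =>
    intro ts hlen _
    have : ts = [] := List.length_eq_zero_iff.1 (Nat.le_zero.1 hlen)
    subst this
    simp [pvGroup, pvScanA, pvFirst]
  | succ n ihn =>
    intro ts hlen hinv
    match ts with
    | [] => simp [pvGroup, pvScanA, pvFirst]
    | ⟨⟨i, b⟩, x⟩ :: ts =>
      have h3 := hinv ((i, b), x) (by simp)
      simp [List.count_cons] at h3
      have hflen : (ts.filter (fun u => u.2 == x)).length = (ts.map (·.2)).count x := by
        rw [List.count_eq_countP, List.countP_map, List.countP_eq_length_filter]
        rfl
      rw [pvGroup]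
      simp only [List.map_cons]
      by_cases h1 : F.count x = 1
      · have h0 : (ts.filter (fun u => u.2 == x)).length = 0 := by omega
        have hnil : ts.filter (fun u => u.2 == x) = [] := List.length_eq_zero_iff.1 h0
        rw [hnil, List.map_nil]
        simp [pvScanA, pvFirst, h1]
      · have hlen1 : (Sum.inl (α := Int × List Int) (β := List Int) (i, b)
            :: (ts.filter (fun u => u.2 == x)).map (fun u => Sum.inr u.1.2)).length ≠ 1 := by
          simp only [List.length_cons, List.length_map]
          omega
        rw [pvScanA, if_neg hlen1, pvFirst, if_neg h1]
        have hinv' : ∀ u ∈ ts.filter (fun u => !(u.2 == x)),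
            ((ts.filter (fun u => !(u.2 == x))).map (·.2)).count u.2 = F.count u.2 := by
          intro u hu
          rw [List.mem_filter] at hu
          have hne : u.2 ≠ x := by simpa using hu.2
          have hxu : (x == u.2) = false := by simp [Ne.symm hne]
          have h2 : ((ts.filter (fun u => !(u.2 == x))).map (·.2)).count u.2
              = (ts.map (·.2)).count u.2 := by
            simp only [List.count_eq_countP, List.countP_map, List.countP_filter]
            apply List.countP_congr
            intro w _
            by_cases hw : w.2 = u.2
            · simp [Function.comp, hw, hne]
            · simp [Function.comp, hw]
          have h4 := hinv u (List.mem_cons_of_mem _ hu.1)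
          rw [h2]
          simpa [List.count_cons, hxu] using h4
        have hlen2 : (ts.filter (fun u => !(u.2 == x))).length ≤ n := by
          have := List.length_filter_le (fun u => !(u.2 == x)) ts
          simp only [List.length_cons] at hlen
          omega
        rw [ihn _ hlen2 hinv', ← pvFirst_filter_ne buttons F x h1 ts]
        intro i1 b1 heq
        exact hlen1 (by rw [heq]; rfl)

theorem pvScanA_group (buttons : List (List Int)) (F : List Int) (ts : List ((Int × List Int) × Int))
    (hinv : ∀ t ∈ ts, (ts.map (·.2)).count t.2 = F.count t.2) :
    pvScanA buttons ((pvGroup ts).map (·.2)) = pvFirst buttons (F.count) ts :=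
  pvScanA_group_aux buttons F ts.length ts le_rfl hinv

theorem pvCountsB_aux (bs : List (List Int)) :
    ∀ (d : PySem.Dict Int Int) (x : Int),
    (bs.foldl (fun c b => b.foldl (fun c x => c.insert x (c.getD x 0 + 1)) c) d).getD x 0
      = d.getD x 0 + ((bs.flatMap id).count x : Int) := by
  induction bs with
  | nil => intro d x; simp
  | cons b bs ih =>
    intro d x
    rw [List.foldl_cons, ih, PySem.Dict.getD_foldl_insert_add_one]
    simp [List.count_append]
    ring

theorem pvCountsB_getD (buttons : List (List Int)) (x : Int) :
    (pvCountsB buttons).getD x 0 = ((buttons.flatMap id).count x : Int) := by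
  rw [pvCountsB, pvCountsB_aux]
  simp

theorem pvFirst_map_append (buttons : List (List Int)) (F : List Int) (counts : PySem.Dict Int Int)
    (hc : ∀ x, counts.getD x 0 = (F.count x : Int)) (p : Int × List Int) (b : List Int)
    (ts : List ((Int × List Int) × Int)) :
    pvFirst buttons (F.count) (b.map (fun x => (p, x)) ++ ts)
      = if b.any (fun x => counts.getD x 0 == 1) then
          some (p.2, PySem.List.slice buttons none (some p.1) ++ PySem.List.slice buttons (some (p.1 + 1)) none)
        else pvFirst buttons (F.count) ts := by
  induction b with
  | nil => simp [List.any_nil]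
  | cons x b ih =>
    have hiff : (counts.getD x 0 == 1) = decide (F.count x = 1) := by
      rw [hc x]
      by_cases h : F.count x = 1
      · simp [h]
      · have h2 : ((F.count x : Int)) ≠ 1 := by exact_mod_cast h
        simp [h, h2]
    rw [List.map_cons, List.cons_append, pvFirst, List.any_cons, hiff]
    by_cases h : F.count x = 1
    · simp [h]
    · simp only [h, decide_false, Bool.false_or, if_neg h]
      exact ih

theorem pvScanB_first (buttons : List (List Int)) (F : List Int) (counts : PySem.Dict Int Int)
    (hc : ∀ x, counts.getD x 0 = (F.count x : Int)) (l : List (Int × List Int)) :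
    pvScanB buttons counts l = pvFirst buttons (F.count) (l.flatMap (fun p => p.2.map (fun x => (p, x)))) := by
  induction l with
  | nil => rfl
  | cons p l ih =>
    rw [List.flatMap_cons, pvFirst_map_append buttons F counts hc, pvScanB]
    by_cases h : p.2.any (fun x => counts.getD x 0 == 1) = true
    · simp [h]
    · simp only [Bool.not_eq_true] at h
      simp [h, ih]

theorem pvEnum_flat (buttons : List (List Int)) :
    ∀ s, (PySem.List.enumerate buttons s).flatMap (fun p => p.2) = buttons.flatten := by
  induction buttons with
  | nil => intro s; simp [PySem.List.enumerate_nil]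
  | cons b bs ih =>
    intro s
    rw [PySem.List.enumerate_cons, List.flatMap_cons, ih]
    simp

theorem pvTris_map_snd (buttons : List (List Int)) :
    (pvTris buttons).map (·.2) = buttons.flatMap id := by
  rw [show buttons.flatMap id = buttons.flatten from by simp]
  rw [← pvEnum_flat buttons 0]
  simp [pvTris, List.map_flatMap, Function.comp]

-- ===== VERDICT (by name: the statement is the Claim_ definition above) =====
theorem find_solo_spec : Claim_equal_find_solo := by
  intro buttons _
  unfold Spec_find_solo find_solo find_solo_alt
  simp only [PySem.Dict.values]
  rw [pvBuildA_items, pvScanA_group buttons (buttons.flatMap id) (pvTris buttons)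
      (by intro t _; rw [pvTris_map_snd]),
    pvScanB_first buttons (buttons.flatMap id) _ (pvCountsB_getD buttons)]
  rfl
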